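-- pv_equiv track=rewrite | github.com/TryingOutSomething/CZ3005-Assignments | gym.py | get_all_states_in_environment
-- ===== SOURCE A (Python) =====
-- def get_all_states_in_environment(dimension):
--     return list(
--         dict.fromkeys(
--             [f"{i}{j}{k}"
--              for i in range(dimension)
--              for j in range(dimension)
--              for k in range(dimension) if i != 0 or j != 0 or k != 0]
--         )
--     )
-- ===== SOURCE B (Python) =====
-- def get_all_states_in_environment(dimension):
--     # One flat enumeration over mixed-radix indices 1 .. dimension**3 - 1
--     # (index 0 is the origin, so it is skipped without a per-element test),
--     # decoding each index into its three digits.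
--     return list(
--         dict.fromkeys(
--             f"{idx // (dimension * dimension)}{(idx // dimension) % dimension}{idx % dimension}"
--             for idx in range(1, dimension ** 3)
--         )
--     )
-- ===== Notes on version B (the rewrite author's own statement) =====
-- stated objective: alternative
-- what changed: Replaces the triple nested comprehension with a single flat enumeration over indices range(1, dimension**3), decoding each index into its three coordinates by div/mod (the origin is index 0 and is skipped by starting at 1, removing the per-element filter); the first-occurrence dedup is kept since multi-digit coordinates (dimension > 10) can collide.
import Mathlib
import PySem

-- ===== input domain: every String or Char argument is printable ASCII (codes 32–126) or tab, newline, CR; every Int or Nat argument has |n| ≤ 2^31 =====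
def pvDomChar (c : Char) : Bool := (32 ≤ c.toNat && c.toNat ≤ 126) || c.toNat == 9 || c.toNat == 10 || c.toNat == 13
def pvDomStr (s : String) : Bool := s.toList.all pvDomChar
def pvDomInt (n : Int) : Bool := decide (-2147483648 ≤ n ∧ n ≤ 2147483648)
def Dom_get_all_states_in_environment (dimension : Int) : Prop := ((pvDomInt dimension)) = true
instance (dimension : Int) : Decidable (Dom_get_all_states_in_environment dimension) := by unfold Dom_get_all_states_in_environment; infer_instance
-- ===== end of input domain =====

-- B replaces A's triple nested comprehension by a single flat enumeration of the
-- mixed-radix indices 1 .. dimension³-1, decoding each index by div/mod (objective: alternative).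

-- ===== PORT A =====
def get_all_states_in_environment (dimension : Int) : List String :=
  PySem.List.dedup (
    (PySem.List.pyRange 0 dimension 1).flatMap (fun i =>
      (PySem.List.pyRange 0 dimension 1).flatMap (fun j =>
        (PySem.List.pyRange 0 dimension 1).flatMap (fun k =>
          if i ≠ 0 ∨ j ≠ 0 ∨ k ≠ 0 then
            [PySem.Int.toStr i ++ PySem.Int.toStr j ++ PySem.Int.toStr k]
          else []))))

-- ===== PORT B =====
def get_all_states_in_environment_alt (dimension : Int) : List String :=
  PySem.List.dedup (
    (PySem.List.pyRange 1 (dimension ^ 3) 1).map (fun idx =>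
      PySem.Int.toStr (PySem.Int.floordiv idx (dimension * dimension)) ++
      PySem.Int.toStr (PySem.Int.mod (PySem.Int.floordiv idx dimension) dimension) ++
      PySem.Int.toStr (PySem.Int.mod idx dimension)))

-- ===== PRECONDITION & SPEC =====
def Spec_get_all_states_in_environment (dimension : Int) (out : List String) : Prop := out = get_all_states_in_environment_alt dimension
instance (dimension : Int) (out : List String) : Decidable (Spec_get_all_states_in_environment dimension out) := by unfold Spec_get_all_states_in_environment; infer_instance

-- ===== CLAIM (what is proved, stated in full; the proofs are below) =====
def Claim_equal_get_all_states_in_environment : Prop := ∀ (dimension : Int), Dom_get_all_states_in_environment dimension → Spec_get_all_states_in_environment dimension (get_all_states_in_environment dimension)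

-- ===== LEMMAS AND PROOFS =====

-- the digit-string of the mixed-radix decoding of m in base n
def pvDigits (n m : Nat) : String :=
  PySem.Int.toStr ((m / (n * n) : Nat) : Int) ++
  PySem.Int.toStr ((m / n % n : Nat) : Int) ++
  PySem.Int.toStr ((m % n : Nat) : Int)

def pvBody (n m : Nat) : List String := if m = 0 then [] else [pvDigits n m]

-- flat range over m*n splits into a nested double loop
theorem pv_flat_split {α : Type} (m n : Nat) (f : Nat → List α) :
    (List.range (m * n)).flatMap f
      = (List.range m).flatMap (fun i => (List.range n).flatMap (fun j => f (i * n + j))) := by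
  induction m with
  | zero => simp
  | succ m ih =>
    have h1 : (m + 1) * n = m * n + n := by ring
    rw [h1, List.range_add, List.flatMap_append, ih, List.range_succ, List.flatMap_append]
    simp [List.flatMap_map]

theorem pv_flatMap_congr {α β : Type} (xs : List α) (f g : α → List β)
    (h : ∀ x ∈ xs, f x = g x) : xs.flatMap f = xs.flatMap g := by
  induction xs with
  | nil => rfl
  | cons x xs ih =>
    simp only [List.flatMap_cons]
    rw [h x (by simp), ih (fun y hy => h y (by simp [hy]))]

-- arithmetic of the decoding at an in-range triple
theorem pv_decode (n i j k : Nat) (hj : j < n) (hk : k < n) :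
    pvBody n (i * (n * n) + (j * n + k))
      = (if (i : Int) ≠ 0 ∨ (j : Int) ≠ 0 ∨ (k : Int) ≠ 0 then
          [PySem.Int.toStr (i : Int) ++ PySem.Int.toStr (j : Int) ++ PySem.Int.toStr (k : Int)]
        else []) := by
  have hn : 0 < n := by omega
  have hmod : (i * (n * n) + (j * n + k)) % n = k := by
    have h1 : i * (n * n) + (j * n + k) = k + (i * n + j) * n := by ring
    rw [h1, Nat.add_mul_mod_self_right, Nat.mod_eq_of_lt hk]
  have hdiv : (i * (n * n) + (j * n + k)) / n = i * n + j := by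
    have h1 : i * (n * n) + (j * n + k) = k + (i * n + j) * n := by ring
    rw [h1, Nat.add_mul_div_right _ _ hn, Nat.div_eq_of_lt hk, Nat.zero_add]
  have hdivmod : (i * n + j) % n = j := by
    have h1 : i * n + j = j + i * n := by ring
    rw [h1, Nat.add_mul_mod_self_right, Nat.mod_eq_of_lt hj]
  have hdiv2 : (i * (n * n) + (j * n + k)) / (n * n) = i := by
    have hlt : j * n + k < n * n := by
      calc j * n + k < j * n + n := by omega
        _ = (j + 1) * n := by ring
        _ ≤ n * n := Nat.mul_le_mul_right n hj
    have h1 : i * (n * n) + (j * n + k) = (j * n + k) + i * (n * n) := by ring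
    rw [h1, Nat.add_mul_div_right _ _ (Nat.mul_pos hn hn), Nat.div_eq_of_lt hlt, Nat.zero_add]
  have hzero : (i * (n * n) + (j * n + k) = 0) ↔ ¬((i : Int) ≠ 0 ∨ (j : Int) ≠ 0 ∨ (k : Int) ≠ 0) := by
    simp only [Nat.add_eq_zero_iff, Nat.mul_eq_zero, ne_eq, Nat.cast_eq_zero]
    omega
  unfold pvBody pvDigits
  rw [hmod, hdiv, hdivmod, hdiv2]
  by_cases hc : (i : Int) ≠ 0 ∨ (j : Int) ≠ 0 ∨ (k : Int) ≠ 0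
  · rw [if_pos hc, if_neg (by rw [hzero]; exact fun h => h hc)]
  · rw [if_neg hc, if_pos (hzero.mpr hc)]

-- the nested-loop (A) list, over Nat ranges, equals the flat (range n³) list
theorem pv_nested_eq_flat (n : Nat) :
    (List.range n).flatMap (fun (i : Nat) => (List.range n).flatMap (fun (j : Nat) =>
      (List.range n).flatMap (fun (k : Nat) =>
        if (i : Int) ≠ 0 ∨ (j : Int) ≠ 0 ∨ (k : Int) ≠ 0 then
          [PySem.Int.toStr (i : Int) ++ PySem.Int.toStr (j : Int) ++ PySem.Int.toStr (k : Int)]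
        else [])))
      = (List.range (n * (n * n))).flatMap (pvBody n) := by
  rw [pv_flat_split n (n * n) (pvBody n)]
  refine pv_flatMap_congr _ _ _ (fun i hi => ?_)
  rw [pv_flat_split n n (fun r => pvBody n (i * (n * n) + r))]
  refine pv_flatMap_congr _ _ _ (fun j hj => ?_)
  refine pv_flatMap_congr _ _ _ (fun k hk => ?_)
  exact (pv_decode n i j k (List.mem_range.mp hj) (List.mem_range.mp hk)).symm

-- peeling index 0 off the flat list gives a plain map over range (N-1)
theorem pv_flat_peel (N : Nat) (n : Nat) (hN : 0 < N) :
    (List.range N).flatMap (pvBody n)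
      = (List.range (N - 1)).map (fun m => pvDigits n (1 + m)) := by
  obtain ⟨M, rfl⟩ : ∃ M, N = M + 1 := ⟨N - 1, by omega⟩
  rw [List.range_succ_eq_map, List.flatMap_cons, List.flatMap_map, Nat.add_sub_cancel]
  have h0 : pvBody n 0 = [] := rfl
  rw [h0, List.nil_append]
  have hfun : ∀ m ∈ List.range M, (fun a => pvBody n a.succ) m = (fun m => [pvDigits n (1 + m)]) m := by
    intro m _; simp [pvBody, Nat.succ_eq_add_one, Nat.add_comm]
  rw [pv_flatMap_congr _ _ _ hfun]
  exact List.map_eq_flatMap.symm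

-- ===== VERDICT (by name: the statement is the Claim_ definition above) =====
theorem get_all_states_in_environment_spec : Claim_equal_get_all_states_in_environment := by
  intro d _
  unfold Spec_get_all_states_in_environment get_all_states_in_environment get_all_states_in_environment_alt
  congr 1
  by_cases hd : d ≤ 0
  · have h1 : PySem.List.pyRange 0 d 1 = [] := PySem.List.pyRange_one_eq_nil hd
    have h3 : d ^ 3 ≤ 0 := Odd.pow_nonpos (by norm_num) hd
    have h2 : PySem.List.pyRange 1 (d ^ 3) 1 = [] := PySem.List.pyRange_one_eq_nil (by omega)
    simp [h1, h2]
  · rw [Int.not_le] at hd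
    obtain ⟨n, rfl⟩ : ∃ n : Nat, d = (n : Int) := ⟨d.toNat, by omega⟩
    have hn : 0 < n := by exact_mod_cast hd
    -- A side: Nat-ify the three ranges
    rw [PySem.List.pyRange_zero_natCast n]
    simp only [List.flatMap_map]
    -- B side: Nat-ify the flat range
    have hpow : ((n : Int)) ^ 3 = ((n * (n * n) : Nat) : Int) := by push_cast; ring
    rw [hpow, PySem.List.pyRange_one]
    have htn : (((n * (n * n) : Nat) : Int) - 1).toNat = n * (n * n) - 1 := by omega
    rw [htn, List.map_map]
    -- relate both to the flat pvBody list
    have hA := pv_nested_eq_flat n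
    have hB := pv_flat_peel (n * (n * n)) n (by positivity)
    refine hA.trans (hB.trans ?_)
    refine List.map_congr_left (fun m _ => ?_)
    simp only [Function.comp, pvDigits]
    have hb1 : (0 : Int) < (n : Int) := by exact_mod_cast hn
    have hb2 : (0 : Int) < (n : Int) * (n : Int) := by positivity
    rw [PySem.Int.floordiv_eq_ediv_of_pos hb2, PySem.Int.floordiv_eq_ediv_of_pos hb1,
        PySem.Int.mod_eq_emod_of_pos hb1, PySem.Int.mod_eq_emod_of_pos hb1]
    push_cast
    rfl
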